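-- pv_equiv track=rewrite | github.com/AlexGaithuma/Identification-of-Serpins-from-whole-genome | Serpin_annotation.py | max_consecutive_mismatches_ok
-- ===== SOURCE A (Python) =====
-- def max_consecutive_mismatches_ok(seq1, seq2, max_consec=1):
--     """
--     Return True if no more than max_consec consecutive mismatches occur.
--
--     max_consec=1 means: No two (or more) mismatches in a row allowed.
--     """
--     consec = 0
--     for a, b in zip(seq1, seq2):
--         if a != b:
--             consec += 1
--             if consec > max_consec:
--                 return False
--         else:
--             consec = 0
--     return True
-- ===== SOURCE B (Python) =====
-- def max_consecutive_mismatches_ok(seq1, seq2, max_consec=1):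
--     """Run-length decomposition: group the mismatch indicators into maximal
--     runs, then check every mismatch run's length against max_consec."""
--     mis = [a != b for a, b in zip(seq1, seq2)]
--     runs = []
--     key = None
--     cnt = 0
--     for b in mis:
--         if key is not None and b == key:
--             cnt += 1
--         else:
--             if key is not None:
--                 runs.append((key, cnt))
--             key, cnt = b, 1
--     if key is not None:
--         runs.append((key, cnt))
--     return all(n <= max_consec for k, n in runs if k)
-- ===== Notes on version B (the rewrite author's own statement) =====
-- stated objective: alternative
-- what changed: Replaces the running counter with reset and early return by a two-phase run-length decomposition: build the mismatch-indicator list, collapse it into maximal runs, then check every mismatch run's length against max_consec.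
import Mathlib
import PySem

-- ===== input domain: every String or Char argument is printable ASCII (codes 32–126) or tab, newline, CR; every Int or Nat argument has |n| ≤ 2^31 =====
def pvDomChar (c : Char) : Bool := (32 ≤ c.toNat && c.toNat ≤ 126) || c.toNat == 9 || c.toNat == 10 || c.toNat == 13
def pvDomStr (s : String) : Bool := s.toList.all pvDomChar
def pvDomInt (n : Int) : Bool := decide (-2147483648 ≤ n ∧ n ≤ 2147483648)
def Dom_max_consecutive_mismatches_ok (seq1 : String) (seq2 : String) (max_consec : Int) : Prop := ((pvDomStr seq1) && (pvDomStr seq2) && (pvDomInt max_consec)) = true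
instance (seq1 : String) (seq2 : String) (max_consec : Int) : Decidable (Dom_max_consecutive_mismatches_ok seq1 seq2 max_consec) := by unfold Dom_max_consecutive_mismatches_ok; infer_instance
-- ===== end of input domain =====

-- B replaces A's running counter (with reset and early return) by a run-length
-- decomposition of the mismatch indicators followed by a check of each mismatch
-- run's length; same O(n) cost, a genuinely different decomposition.


-- ===== PORT A =====
-- the for-loop over zip(seq1, seq2) with the running counter `consec` and early return
def pvGoA (m : Int) : List (Char × Char) → Int → Bool
  | [], _ => true
  | (a, b) :: rest, consec =>
    if a ≠ b then
      if consec + 1 > m then false else pvGoA m rest (consec + 1)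
    else pvGoA m rest 0

def max_consecutive_mismatches_ok (seq1 : String) (seq2 : String) (max_consec : Int) : Bool :=
  pvGoA max_consec (List.zip seq1.toList seq2.toList) 0

-- ===== PORT B =====
-- the grouping loop of Source B: current run key/count, emit on key change, emit the last run
def pvRunsGo (key : Bool) (cnt : Int) : List Bool → List (Bool × Int)
  | [] => [(key, cnt)]
  | b :: rest => if b = key then pvRunsGo key (cnt + 1) rest
                 else (key, cnt) :: pvRunsGo b 1 rest

def pvRuns : List Bool → List (Bool × Int)
  | [] => []
  | b :: rest => pvRunsGo b 1 rest

-- all(n <= max_consec for k, n in runs if k)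
def pvAllOK (m : Int) (rs : List (Bool × Int)) : Bool :=
  rs.all (fun p => !p.1 || decide (p.2 ≤ m))

def max_consecutive_mismatches_ok_alt (seq1 : String) (seq2 : String) (max_consec : Int) : Bool :=
  pvAllOK max_consec (pvRuns ((List.zip seq1.toList seq2.toList).map (fun p => decide (p.1 ≠ p.2))))

-- ===== PRECONDITION & SPEC =====
def Spec_max_consecutive_mismatches_ok (seq1 : String) (seq2 : String) (max_consec : Int) (out : Bool) : Prop := out = max_consecutive_mismatches_ok_alt seq1 seq2 max_consec
instance (seq1 : String) (seq2 : String) (max_consec : Int) (out : Bool) : Decidable (Spec_max_consecutive_mismatches_ok seq1 seq2 max_consec out) := by unfold Spec_max_consecutive_mismatches_ok; infer_instance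

-- ===== CLAIM (what is proved, stated in full; the proofs are below) =====
def Claim_equal_max_consecutive_mismatches_ok : Prop := ∀ (seq1 : String) (seq2 : String) (max_consec : Int), Dom_max_consecutive_mismatches_ok seq1 seq2 max_consec → Spec_max_consecutive_mismatches_ok seq1 seq2 max_consec (max_consecutive_mismatches_ok seq1 seq2 max_consec)

-- ===== LEMMAS AND PROOFS =====

-- the mismatch-indicator list B builds from the zipped pairs
def pvMis (l : List (Char × Char)) : List Bool := l.map (fun p => decide (p.1 ≠ p.2))

theorem pvMis_cons (a b : Char) (l : List (Char × Char)) :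
    pvMis ((a, b) :: l) = decide (a ≠ b) :: pvMis l := rfl

theorem pvRunsGo_cons_same (key : Bool) (cnt : Int) (b : Bool) (l : List Bool)
    (h : b = key) : pvRunsGo key cnt (b :: l) = pvRunsGo key (cnt + 1) l := by
  simp [pvRunsGo, h]

theorem pvRunsGo_cons_diff (key : Bool) (cnt : Int) (b : Bool) (l : List Bool)
    (h : b ≠ key) : pvRunsGo key cnt (b :: l) = (key, cnt) :: pvRunsGo b 1 l := by
  simp [pvRunsGo, h]

theorem pvAllOK_cons (m : Int) (k : Bool) (n : Int) (rs : List (Bool × Int)) :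
    pvAllOK m ((k, n) :: rs) = ((!k || decide (n ≤ m)) && pvAllOK m rs) := by
  simp [pvAllOK]

theorem pvGoA_cons_miss (m : Int) (a b : Char) (rest : List (Char × Char)) (c : Int)
    (h : a ≠ b) :
    pvGoA m ((a, b) :: rest) c =
      (if c + 1 > m then false else pvGoA m rest (c + 1)) := by
  simp [pvGoA, h]

theorem pvGoA_cons_match (m : Int) (a b : Char) (rest : List (Char × Char)) (c : Int)
    (h : a = b) : pvGoA m ((a, b) :: rest) c = pvGoA m rest 0 := by
  simp [pvGoA, h]

-- a current mismatch run already longer than m can never pass the final check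
theorem pvRunsGo_true_over (m : Int) :
    ∀ (l : List Bool) (cnt : Int), m < cnt →
      pvAllOK m (pvRunsGo true cnt l) = false := by
  intro l
  induction l with
  | nil =>
    intro cnt h
    simp [pvRunsGo, pvAllOK]
    omega
  | cons b rest ih =>
    intro cnt h
    by_cases hb : b = true
    · rw [pvRunsGo_cons_same _ _ _ _ hb]
      exact ih (cnt + 1) (by omega)
    · rw [pvRunsGo_cons_diff _ _ _ _ hb, pvAllOK_cons]
      simp
      omega

-- joint loop invariant: A's counter state corresponds to B's current run
theorem pvGo_runsGo (m : Int) :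
    ∀ (l : List (Char × Char)),
      (∀ cnt : Int, 0 < cnt → cnt ≤ m →
        pvGoA m l cnt = pvAllOK m (pvRunsGo true cnt (pvMis l))) ∧
      (∀ cnt : Int,
        pvGoA m l 0 = pvAllOK m (pvRunsGo false cnt (pvMis l))) := by
  intro l
  induction l with
  | nil =>
    constructor
    · intro cnt _ h2
      simp [pvGoA, pvMis, pvRunsGo, pvAllOK, h2]
    · intro cnt
      simp [pvGoA, pvMis, pvRunsGo, pvAllOK]
  | cons p rest ih =>
    obtain ⟨a, b⟩ := p
    by_cases hab : a = b
    · -- match: indicator false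
      have hd : (decide (a ≠ b)) = false := by simp [hab]
      constructor
      · intro cnt h1 h2
        rw [pvGoA_cons_match _ _ _ _ _ hab, pvMis_cons, hd,
            pvRunsGo_cons_diff _ _ _ _ (by simp), pvAllOK_cons]
        have hpass : (!true || decide (cnt ≤ m)) = true := by simp; omega
        rw [hpass, Bool.true_and]
        exact ih.2 1
      · intro cnt
        rw [pvGoA_cons_match _ _ _ _ _ hab, pvMis_cons, hd,
            pvRunsGo_cons_same _ _ _ _ rfl]
        exact ih.2 (cnt + 1)
    · -- mismatch: indicator true
      have hd : (decide (a ≠ b)) = true := by simp [hab]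
      constructor
      · intro cnt h1 h2
        rw [pvGoA_cons_miss _ _ _ _ _ hab, pvMis_cons, hd,
            pvRunsGo_cons_same _ _ _ _ rfl]
        by_cases hover : cnt + 1 > m
        · rw [if_pos hover, pvRunsGo_true_over m _ (cnt + 1) (by omega)]
        · rw [if_neg hover]
          exact ih.1 (cnt + 1) (by omega) (by omega)
      · intro cnt
        rw [pvGoA_cons_miss _ _ _ _ _ hab, pvMis_cons, hd,
            pvRunsGo_cons_diff _ _ _ _ (by simp), pvAllOK_cons]
        have hpass : (!false || decide (cnt ≤ m)) = true := by simp
        rw [hpass, Bool.true_and]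
        by_cases hover : (0 : Int) + 1 > m
        · rw [if_pos hover, pvRunsGo_true_over m _ 1 (by omega)]
        · rw [if_neg hover]
          exact ih.1 1 (by omega) (by omega)

theorem pvMain (m : Int) (l : List (Char × Char)) :
    pvGoA m l 0 = pvAllOK m (pvRuns (pvMis l)) := by
  cases l with
  | nil => simp [pvGoA, pvMis, pvRuns, pvAllOK]
  | cons p rest =>
    obtain ⟨a, b⟩ := p
    by_cases hab : a = b
    · have hd : (decide (a ≠ b)) = false := by simp [hab]
      rw [pvGoA_cons_match _ _ _ _ _ hab, pvMis_cons, hd]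
      show pvGoA m rest 0 = pvAllOK m (pvRunsGo false 1 (pvMis rest))
      exact (pvGo_runsGo m rest).2 1
    · have hd : (decide (a ≠ b)) = true := by simp [hab]
      rw [pvGoA_cons_miss _ _ _ _ _ hab, pvMis_cons, hd]
      show (if (0 : Int) + 1 > m then false else pvGoA m rest (0 + 1)) =
        pvAllOK m (pvRunsGo true 1 (pvMis rest))
      by_cases hover : (0 : Int) + 1 > m
      · rw [if_pos hover, pvRunsGo_true_over m _ 1 (by omega)]
      · rw [if_neg hover]
        exact (pvGo_runsGo m rest).1 1 (by omega) (by omega)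

-- ===== VERDICT (by name: the statement is the Claim_ definition above) =====
theorem max_consecutive_mismatches_ok_spec : Claim_equal_max_consecutive_mismatches_ok := by
  intro seq1 seq2 m _
  unfold Spec_max_consecutive_mismatches_ok max_consecutive_mismatches_ok max_consecutive_mismatches_ok_alt
  exact pvMain m (List.zip seq1.toList seq2.toList)
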